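-- pv_equiv track=rewrite | github.com/Chris0x88/spacelord | src/plugins/telegram/formatters.py | format_swap_pick_to
-- ===== SOURCE A (Python) =====
-- from typing import Dict, Any, List, Optional, Tuple
--
-- _DIVIDER = "━━━━━━━━━━━━━━━━━━━━━━━━"
--
-- TRADEABLE_TOKENS = [
--     {"sym": "HBAR",     "id": "0.0.0",         "emoji": "⟐"},
--     {"sym": "USDC",     "id": "0.0.456858",     "emoji": "💵"},
--     {"sym": "USDC[hts]","id": "0.0.1055459",    "emoji": "💲"},
--     {"sym": "SAUCE",    "id": "0.0.731861",     "emoji": "🍕"},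
--     {"sym": "WBTC",     "id": "0.0.10082597",   "emoji": "₿"},
--     {"sym": "WETH",     "id": "0.0.9470869",    "emoji": "Ξ"},
--     {"sym": "HBARX",    "id": "0.0.834116",     "emoji": "🔷"},
-- ]
--
-- def format_swap_pick_to(from_sym: str, from_id: str) -> Tuple[str, Dict[str, Any]]:
--     """After picking 'From', pick 'To' token."""
--     text = (
--         "💱 <b>Swap Tokens</b>\n"
--         f"{_DIVIDER}\n\n"
--         f"  Selling: <b>{_escape(from_sym)}</b>\n\n"
--         "Select the token you want to <b>buy</b>:"
--     )
--     rows = []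
--     row = []
--     for t in TRADEABLE_TOKENS:
--         if t["id"] == from_id:
--             continue  # Can't swap to same token
--         row.append({"text": f"{t['emoji']} {t['sym']}", "callback_data": f"st:{from_id}:{t['id']}"})
--         if len(row) == 3:
--             rows.append(row)
--             row = []
--     if row:
--         rows.append(row)
--     rows.append([
--         {"text": "⬅️ Change From", "callback_data": "swap"},
--         {"text": "⬅️ Main Menu", "callback_data": "menu"},
--     ])
--     return text, {"inline_keyboard": rows}
--
-- def _escape(text: str) -> str:
--     return (
--         str(text)
--         .replace("&", "&amp;")
--         .replace("<", "&lt;")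
--         .replace(">", "&gt;")
--     )
-- ===== SOURCE B (Python) =====
-- # B: two-pass decomposition — build the flat button list with one comprehension,
-- # then chunk it into rows of three by slicing; same text, same nav row.
-- _DIVIDER = "━━━━━━━━━━━━━━━━━━━━━━━━"
--
-- TRADEABLE_TOKENS = [
--     {"sym": "HBAR",     "id": "0.0.0",         "emoji": "⟐"},
--     {"sym": "USDC",     "id": "0.0.456858",     "emoji": "💵"},
--     {"sym": "USDC[hts]","id": "0.0.1055459",    "emoji": "💲"},
--     {"sym": "SAUCE",    "id": "0.0.731861",     "emoji": "🍕"},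
--     {"sym": "WBTC",     "id": "0.0.10082597",   "emoji": "₿"},
--     {"sym": "WETH",     "id": "0.0.9470869",    "emoji": "Ξ"},
--     {"sym": "HBARX",    "id": "0.0.834116",     "emoji": "🔷"},
-- ]
--
-- def _escape(text: str) -> str:
--     return (
--         str(text)
--         .replace("&", "&amp;")
--         .replace("<", "&lt;")
--         .replace(">", "&gt;")
--     )
--
-- def format_swap_pick_to(from_sym: str, from_id: str):
--     text = (
--         "💱 <b>Swap Tokens</b>\n"
--         f"{_DIVIDER}\n\n"
--         f"  Selling: <b>{_escape(from_sym)}</b>\n\n"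
--         "Select the token you want to <b>buy</b>:"
--     )
--     buttons = [
--         {"text": f"{t['emoji']} {t['sym']}", "callback_data": f"st:{from_id}:{t['id']}"}
--         for t in TRADEABLE_TOKENS
--         if t["id"] != from_id
--     ]
--     rows = [buttons[i:i + 3] for i in range(0, len(buttons), 3)]
--     rows.append([
--         {"text": "⬅️ Change From", "callback_data": "swap"},
--         {"text": "⬅️ Main Menu", "callback_data": "menu"},
--     ])
--     return text, {"inline_keyboard": rows}
-- ===== Notes on version B (the rewrite author's own statement) =====
-- stated objective: simpler
-- what changed: Replaces A's stateful accumulator loop (row buffer flushed at length 3, leftover flushed after the loop) with two declarative passes: one comprehension builds the flat button list, then rows are produced by slicing it in steps of three.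
import Mathlib
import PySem

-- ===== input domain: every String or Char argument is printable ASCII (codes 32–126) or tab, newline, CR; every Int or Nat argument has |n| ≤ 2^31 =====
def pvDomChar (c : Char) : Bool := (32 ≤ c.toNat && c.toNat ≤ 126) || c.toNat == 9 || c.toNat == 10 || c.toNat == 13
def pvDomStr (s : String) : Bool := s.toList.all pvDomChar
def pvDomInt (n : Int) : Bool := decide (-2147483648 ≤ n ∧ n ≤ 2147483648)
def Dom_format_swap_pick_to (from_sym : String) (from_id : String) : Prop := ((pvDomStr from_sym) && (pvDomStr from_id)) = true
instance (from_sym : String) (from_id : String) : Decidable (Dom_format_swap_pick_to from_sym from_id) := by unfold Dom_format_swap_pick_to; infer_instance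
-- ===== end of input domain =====

-- B changes only the decomposition (flat comprehension + slice-chunking instead of A's
-- accumulator loop); same output, no speed claim.

-- shared module constants (TRADEABLE_TOKENS as (sym, id, emoji); _DIVIDER)
def pvTokens : List (String × String × String) :=
  [("HBAR", "0.0.0", "⟐"),
   ("USDC", "0.0.456858", "💵"),
   ("USDC[hts]", "0.0.1055459", "💲"),
   ("SAUCE", "0.0.731861", "🍕"),
   ("WBTC", "0.0.10082597", "₿"),
   ("WETH", "0.0.9470869", "Ξ"),
   ("HBARX", "0.0.834116", "🔷")]

def pvDivider : String := "━━━━━━━━━━━━━━━━━━━━━━━━"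

-- _escape helper (shared by both Pythons)
def pvEscape (t : String) : String :=
  PySem.Str.replace (PySem.Str.replace (PySem.Str.replace t "&" "&amp;") "<" "&lt;") ">" "&gt;"

def pvText (from_sym : String) : String :=
  "💱 <b>Swap Tokens</b>\n" ++ pvDivider ++ "\n\n  Selling: <b>" ++ pvEscape from_sym
    ++ "</b>\n\nSelect the token you want to <b>buy</b>:"

def pvNavRow : List (List (String × String)) :=
  [[("text", "⬅️ Change From"), ("callback_data", "swap")],
   [("text", "⬅️ Main Menu"), ("callback_data", "menu")]]

-- ===== PORT A =====
def format_swap_pick_to (from_sym : String) (from_id : String) : String × (List (String × List (List (List (String × String))))) :=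
  let text := pvText from_sym
  -- the accumulator loop: state (rows, row)
  let st := pvTokens.foldl
    (fun (st : List (List (List (String × String))) × List (List (String × String))) t =>
      if t.2.1 = from_id then st
      else
        let row := st.2 ++ [[("text", t.2.2 ++ " " ++ t.1), ("callback_data", "st:" ++ from_id ++ ":" ++ t.2.1)]]
        if row.length = 3 then (st.1 ++ [row], []) else (st.1, row))
    ([], [])
  let rows := if st.2 = [] then st.1 else st.1 ++ [st.2]
  let rows := rows ++ [pvNavRow]
  (text, [("inline_keyboard", rows)])

-- ===== PORT B =====
def format_swap_pick_to_alt (from_sym : String) (from_id : String) : String × (List (String × List (List (List (String × String))))) :=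
  let text := pvText from_sym
  -- pass 1: flat comprehension over the tokens
  let buttons := (pvTokens.filter (fun t => t.2.1 ≠ from_id)).map
    (fun t => [("text", t.2.2 ++ " " ++ t.1), ("callback_data", "st:" ++ from_id ++ ":" ++ t.2.1)])
  -- pass 2: chunk by slicing, [buttons[i:i+3] for i in range(0, len(buttons), 3)]
  let rows := (PySem.List.pyRange 0 (buttons.length : Int) 3).map
    (fun i => PySem.List.slice buttons (some i) (some (i + 3)))
  let rows := rows ++ [pvNavRow]
  (text, [("inline_keyboard", rows)])

-- ===== PRECONDITION & SPEC =====
def Spec_format_swap_pick_to (from_sym : String) (from_id : String) (out : String × (List (String × List (List (List (String × String)))))) : Prop := out = format_swap_pick_to_alt from_sym from_id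
instance (from_sym : String) (from_id : String) (out : String × (List (String × List (List (List (String × String)))))) : Decidable (Spec_format_swap_pick_to from_sym from_id out) := by
  unfold Spec_format_swap_pick_to
  haveI h2 : DecidableEq (String × List (List (List (String × String)))) := inferInstance
  haveI h3 : DecidableEq (List (String × List (List (List (String × String))))) := List.hasDecEq
  infer_instance

-- ===== CLAIM (what is proved, stated in full; the proofs are below) =====
def Claim_equal_format_swap_pick_to : Prop := ∀ (from_sym : String) (from_id : String), Dom_format_swap_pick_to from_sym from_id → Spec_format_swap_pick_to from_sym from_id (format_swap_pick_to from_sym from_id)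

-- ===== LEMMAS AND PROOFS =====

-- ===== VERDICT (by name: the statement is the Claim_ definition above) =====
theorem format_swap_pick_to_spec : Claim_equal_format_swap_pick_to := by
  intro from_sym from_id _
  unfold Spec_format_swap_pick_to
  by_cases h0 : from_id = "0.0.0"
  · subst h0; rfl
  by_cases h1 : from_id = "0.0.456858"
  · subst h1; rfl
  by_cases h2 : from_id = "0.0.1055459"
  · subst h2; rfl
  by_cases h3 : from_id = "0.0.731861"
  · subst h3; rfl
  by_cases h4 : from_id = "0.0.10082597"
  · subst h4; rfl
  by_cases h5 : from_id = "0.0.9470869"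
  · subst h5; rfl
  by_cases h6 : from_id = "0.0.834116"
  · subst h6; rfl
  simp [format_swap_pick_to, format_swap_pick_to_alt, pvTokens, List.foldl, List.filter,
    Ne.symm h0, Ne.symm h1, Ne.symm h2, Ne.symm h3, Ne.symm h4, Ne.symm h5, Ne.symm h6,
    PySem.List.pyRange, PySem.List.slice, PySem.List.clampIdx]
  norm_num [List.range_succ]
  exact ⟨rfl, rfl, rfl⟩
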